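-- pv_equiv track=rewrite | github.com/Hiraoka-Group/rsu-project | rsuanalyzer/core/conf_id.py | ring_to_chains
-- ===== SOURCE A (Python) =====
-- def ring_to_chains(conf_id_of_ring: str) -> list[str]:
--     """
--     Convert the conformation ID of a ring to the conformation IDs of
--     the chains.
--
--     Args:
--     - conf_id_of_ring (str): The conformation ID of the ring.
--       This should contain the same number of connection types as the
--       number of ligands in the ring. For example, for a 2-membered ring,
--       it would be "RRFFRLFF".
--
--     Returns:
--     - list[str]: The conformation IDs of the chains.
--
--     Examples:
--     >>> ring_to_chains("RRFFRLFF")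
--     ['RRFFRL', 'RLFFRR']
--     >>> ring_to_chains("RRFFRLFFRRBF")
--     ['RRFFRLFFRR', 'RRBFRRFFRL', 'RLFFRRBFRR']
--     """
--     # Validate the input.
--     if len(conf_id_of_ring) % 4 != 0:
--         raise ValueError(
--             "The length of the conformation ID of the ring should be a "
--             "multiple of 4.")
--
--     chain_length = len(conf_id_of_ring) // 4
--     chains = []
--     for _ in range(chain_length):
--         conf_id = conf_id_of_ring[:-2]
--         conf_id_of_ring = conf_id_of_ring[-4:] + conf_id_of_ring[:-4]
--         chains.append(conf_id)
--     return chains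
-- ===== SOURCE B (Python) =====
-- def ring_to_chains(conf_id_of_ring: str) -> list[str]:
--     if len(conf_id_of_ring) % 4 != 0:
--         raise ValueError(
--             "The length of the conformation ID of the ring should be a "
--             "multiple of 4.")
--     n = len(conf_id_of_ring) // 4
--     doubled = conf_id_of_ring + conf_id_of_ring
--     L = 4 * n - 2
--     return [doubled[4 * n - 4 * i: 4 * n - 4 * i + L] for i in range(n)]
-- ===== Notes on version B (the rewrite author's own statement) =====
-- stated objective: simpler
-- what changed: B computes each chain as a direct windowed slice of the doubled string instead of maintaining and repeatedly rotating a running string.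
import Mathlib
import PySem

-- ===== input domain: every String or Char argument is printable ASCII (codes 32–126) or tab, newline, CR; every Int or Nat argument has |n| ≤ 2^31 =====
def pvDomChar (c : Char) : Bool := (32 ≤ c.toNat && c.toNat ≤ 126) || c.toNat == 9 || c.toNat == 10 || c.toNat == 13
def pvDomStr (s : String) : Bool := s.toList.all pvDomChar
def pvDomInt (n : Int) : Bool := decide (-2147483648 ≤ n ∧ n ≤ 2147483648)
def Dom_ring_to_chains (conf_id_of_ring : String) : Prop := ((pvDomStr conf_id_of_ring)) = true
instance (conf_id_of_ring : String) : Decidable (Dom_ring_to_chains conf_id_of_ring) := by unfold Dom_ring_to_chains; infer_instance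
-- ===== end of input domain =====

-- B computes each chain by a direct windowed slice into the doubled string instead of
-- iteratively rotating a running string (objective: simpler; return-value equivalence).

-- ===== PORT A =====
-- Guard: Python raises ValueError when len % 4 ≠ 0; excluded by Pre_, the port returns [] there.
def ring_to_chains (conf_id_of_ring : String) : List String :=
  if PySem.Int.mod (PySem.Str.len conf_id_of_ring) 4 ≠ 0 then []
  else
    let chain_length := (PySem.Int.floordiv (PySem.Str.len conf_id_of_ring) 4).toNat
    let final := (List.range chain_length).foldl
      (fun (st : List Char × List (List Char)) _ =>
        let cur := st.1
        let conf_id := PySem.List.slice cur none (some (-2))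
        let cur' := PySem.List.slice cur (some (-4)) none ++ PySem.List.slice cur none (some (-4))
        (cur', st.2 ++ [conf_id]))
      (conf_id_of_ring.toList, [])
    final.2.map String.ofList

-- ===== PORT B =====
def ring_to_chains_alt (conf_id_of_ring : String) : List String :=
  if PySem.Int.mod (PySem.Str.len conf_id_of_ring) 4 ≠ 0 then []
  else
    let n : Nat := (PySem.Int.floordiv (PySem.Str.len conf_id_of_ring) 4).toNat
    let doubled := conf_id_of_ring.toList ++ conf_id_of_ring.toList
    let L : Int := 4 * (n : Int) - 2
    (List.range n).map (fun (i : Nat) =>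
      String.ofList (PySem.List.slice doubled
        (some (4 * (n : Int) - 4 * (i : Int)))
        (some (4 * (n : Int) - 4 * (i : Int) + L))))

-- ===== PRECONDITION & SPEC =====
-- Pre_ excludes exactly the inputs where A raises ValueError (length not a multiple of 4).
def Pre_ring_to_chains (conf_id_of_ring : String) : Prop :=
  conf_id_of_ring.toList.length % 4 = 0
instance (conf_id_of_ring : String) : Decidable (Pre_ring_to_chains conf_id_of_ring) := by
  unfold Pre_ring_to_chains; infer_instance
def pvWitness_ring_to_chains : String := "RRFFRLFF"

def Spec_ring_to_chains (conf_id_of_ring : String) (out : List String) : Prop := out = ring_to_chains_alt conf_id_of_ring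
instance (conf_id_of_ring : String) (out : List String) : Decidable (Spec_ring_to_chains conf_id_of_ring out) := by unfold Spec_ring_to_chains; infer_instance

-- ===== CLAIM (what is proved, stated in full; the proofs are below) =====
def Claim_equal_ring_to_chains : Prop := ∀ (conf_id_of_ring : String), Dom_ring_to_chains conf_id_of_ring → Pre_ring_to_chains conf_id_of_ring → Spec_ring_to_chains conf_id_of_ring (ring_to_chains conf_id_of_ring)

-- ===== LEMMAS AND PROOFS =====

-- A's loop invariant: after k iterations the running string is t rotated left by 4*(n-k)
-- and the accumulated chains are the first k rotations trimmed to length 4n-2.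
lemma ringA_loop (t : List Char) (n : Nat) (ht : t.length = 4 * n) :
    ∀ k, k ≤ n →
      (List.range k).foldl
        (fun (st : List Char × List (List Char)) _ =>
          let cur := st.1
          let conf_id := PySem.List.slice cur none (some (-2))
          let cur' := PySem.List.slice cur (some (-4)) none ++ PySem.List.slice cur none (some (-4))
          (cur', st.2 ++ [conf_id]))
        (t, [])
      = (t.rotate (4 * (n - k)),
         (List.range k).map (fun i => (t.rotate (4 * (n - i))).take (4 * n - 2))) := by
  intro k hk
  induction k with
  | zero =>
      simp only [List.range_zero, List.foldl_nil, List.map_nil, Nat.sub_zero, ← ht,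
        List.rotate_length]
  | succ k ih =>
      have hk' : k ≤ n := by omega
      rw [List.range_succ, List.foldl_append, ih hk', List.map_append]
      have hlen : (t.rotate (4 * (n - k))).length = 4 * n := by simp [ht]
      have hn1 : 1 ≤ n := by omega
      set cur := t.rotate (4 * (n - k)) with hcur
      have h2 : PySem.List.slice cur none (some (-2)) = cur.take (cur.length - 2) :=
        PySem.List.slice_to_neg_ofNat cur 2 (by omega)
      have h4a : PySem.List.slice cur (some (-4)) none = cur.drop (cur.length - 4) :=
        PySem.List.slice_from_neg_ofNat cur 4 (by omega)
      have h4b : PySem.List.slice cur none (some (-4)) = cur.take (cur.length - 4) :=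
        PySem.List.slice_to_neg_ofNat cur 4 (by omega)
      simp only [List.foldl_cons, List.foldl_nil, List.map_cons, List.map_nil]
      rw [h2, h4a, h4b, hlen]
      simp only [Prod.mk.injEq]
      refine ⟨?_, rfl⟩
      · -- new running string
        have hrot : cur.drop (4 * n - 4) ++ cur.take (4 * n - 4) = cur.rotate (4 * n - 4) := by
          rw [List.rotate_eq_drop_append_take (by omega : 4 * n - 4 ≤ cur.length)]
        rw [hrot, hcur, List.rotate_rotate]
        rw [← List.rotate_mod, show (4 * (n - k) + (4 * n - 4)) % t.length
              = 4 * (n - (k + 1)) % t.length by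
            rw [ht]
            have : 4 * (n - k) + (4 * n - 4) = 4 * (n - (k + 1)) + 4 * n := by omega
            rw [this, Nat.add_mod_right],
          List.rotate_mod]

-- the i-th chain of A equals the i-th windowed slice of B
lemma chain_eq (t : List Char) (n i : Nat) (ht : t.length = 4 * n) (hi : i < n) :
    (t.rotate (4 * (n - i))).take (4 * n - 2)
      = PySem.List.slice (t ++ t) (some (4 * (n : Int) - 4 * (i : Int)))
          (some (4 * (n : Int) - 4 * (i : Int) + (4 * (n : Int) - 2))) := by
  have hd : 4 * (n - i) ≤ t.length := by omega
  have e1 : (4 * (n : Int) - 4 * (i : Int)) = ((4 * (n - i) : Nat) : Int) := by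
    push_cast [Nat.sub_add_cancel]; omega
  have e2 : (4 * (n : Int) - 4 * (i : Int) + (4 * (n : Int) - 2))
      = ((4 * (n - i) : Nat) : Int) + ((4 * n - 2 : Nat) : Int) := by
    push_cast; omega
  rw [e2, e1, PySem.List.slice_natCast_add]
  rw [List.rotate_eq_drop_append_take hd, List.drop_append_of_le_length hd,
      List.take_append, List.take_append]
  congr 1
  rw [List.take_take]
  congr 1
  rw [List.length_drop, ht]
  omega

-- ===== VERDICT (by name: the statement is the Claim_ definition above) =====
theorem ring_to_chains_spec : Claim_equal_ring_to_chains := by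
  intro s _ hpre
  unfold Pre_ring_to_chains at hpre
  unfold Spec_ring_to_chains ring_to_chains ring_to_chains_alt
  obtain ⟨n, hn⟩ : ∃ n, s.toList.length = 4 * n := ⟨s.toList.length / 4, by omega⟩
  have hlen : PySem.Str.len s = ((4 * n : Nat) : Int) := by
    simp [PySem.Str.len_eq, hn]
  have hmod : PySem.Int.mod (PySem.Str.len s) 4 = 0 := by
    rw [hlen]
    rw [show ((4 * n : Nat) : Int) = ((4 * n : Nat) : Int) from rfl]
    rw [show (4 : Int) = ((4 : Nat) : Int) from rfl, PySem.Int.mod_natCast]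
    simp [Nat.mul_mod_right]
  have hdiv : (PySem.Int.floordiv (PySem.Str.len s) 4).toNat = n := by
    rw [hlen, show (4 : Int) = ((4 : Nat) : Int) from rfl, PySem.Int.floordiv_natCast]
    simp
  simp only [hmod, hdiv]
  simp only [ne_eq, not_true_eq_false, if_false]
  rw [ringA_loop s.toList n hn n (le_refl n)]
  simp only [List.map_map]
  apply List.map_congr_left
  intro i hi
  have hi' : i < n := List.mem_range.mp hi
  simp only [Function.comp]
  rw [chain_eq s.toList n i hn hi']
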